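-- pv_equiv track=rewrite | github.com/DinhPhongNe/Python-course | TL-C4K-PTB04/Buoi13/main.py | tim_kiem_tu_giong_nhau
-- ===== SOURCE A (Python) =====
-- def tim_kiem_tu_giong_nhau(danh_sach_chuoi):
--     tu_giong_nhau = []
--     for i in range(len(danh_sach_chuoi)):
--         for j in range(i + 1, len(danh_sach_chuoi)):
--             if danh_sach_chuoi[i] == danh_sach_chuoi[j]:
--                 if danh_sach_chuoi[i] not in tu_giong_nhau:
--                     tu_giong_nhau.append(danh_sach_chuoi[i])
--     return tu_giong_nhau
-- ===== SOURCE B (Python) =====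
-- def tim_kiem_tu_giong_nhau(danh_sach_chuoi):
--     dem = {}
--     for s in danh_sach_chuoi:
--         dem[s] = dem.get(s, 0) + 1
--     ket_qua = []
--     da_gap = set()
--     for s in danh_sach_chuoi:
--         if dem[s] > 1 and s not in da_gap:
--             ket_qua.append(s)
--             da_gap.add(s)
--     return ket_qua
-- ===== Notes on version B (the rewrite author's own statement) =====
-- stated objective: faster
-- what changed: Replaced the O(n^2) nested pairwise scan with a linear-membership result list by a two-pass count-then-select: one pass builds a frequency dict, a second pass emits each element with count > 1 at its first occurrence using a seen set.
import Mathlib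
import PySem

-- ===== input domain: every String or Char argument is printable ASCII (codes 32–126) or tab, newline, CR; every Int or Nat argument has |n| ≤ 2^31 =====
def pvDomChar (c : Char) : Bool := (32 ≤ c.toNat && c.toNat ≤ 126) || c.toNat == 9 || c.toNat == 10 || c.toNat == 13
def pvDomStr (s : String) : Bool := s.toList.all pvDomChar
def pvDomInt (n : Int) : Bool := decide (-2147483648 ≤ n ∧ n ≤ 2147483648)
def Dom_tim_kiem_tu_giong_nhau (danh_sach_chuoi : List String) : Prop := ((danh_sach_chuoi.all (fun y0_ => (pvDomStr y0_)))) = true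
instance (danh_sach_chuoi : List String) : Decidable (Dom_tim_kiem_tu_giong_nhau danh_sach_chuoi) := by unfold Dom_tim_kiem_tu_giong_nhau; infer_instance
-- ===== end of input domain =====

-- B replaces A's O(n^2) nested pairwise scan (with a linear 'not in' on the result) by a
-- two-pass count-then-select: build a frequency dict, then one ordered pass emitting each
-- element with count > 1 at its first occurrence. Objective: faster.

-- ===== PORT A =====
-- inner loop: for j in range(i+1, len): compare l[i] with each later element, in order
def pvInnerA (x : String) : List String → List String → List String
  | [], acc => acc
  | y :: ys, acc =>
      pvInnerA x ys (if x = y then (if x ∉ acc then acc ++ [x] else acc) else acc)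

-- outer loop: i over the positions; l[i] is the head, the js run over the tail
def pvOuterA : List String → List String → List String
  | [], acc => acc
  | x :: xs, acc => pvOuterA xs (pvInnerA x xs acc)

def tim_kiem_tu_giong_nhau (danh_sach_chuoi : List String) : List String :=
  pvOuterA danh_sach_chuoi []

-- ===== PORT B =====
-- second pass of Source B: emit s when dem[s] > 1 and s not yet seen
-- (dem[s] is ported as getD _ 0: every s iterated over is a key of dem, so no KeyError)
def pvSelectB (dem : PySem.Dict String Int) :
    List String → PySem.Set String → List String → List String
  | [], _, ket_qua => ket_qua
  | s :: rest, da_gap, ket_qua =>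
      if 1 < dem.getD s 0 ∧ s ∉ da_gap then
        pvSelectB dem rest (PySem.Set.add da_gap s) (ket_qua ++ [s])
      else
        pvSelectB dem rest da_gap ket_qua

def tim_kiem_tu_giong_nhau_alt (danh_sach_chuoi : List String) : List String :=
  let dem := danh_sach_chuoi.foldl (fun d s => d.insert s (d.getD s 0 + 1)) PySem.Dict.empty
  pvSelectB dem danh_sach_chuoi PySem.Set.empty []

-- ===== PRECONDITION & SPEC =====
def Spec_tim_kiem_tu_giong_nhau (danh_sach_chuoi : List String) (out : List String) : Prop := out = tim_kiem_tu_giong_nhau_alt danh_sach_chuoi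
instance (danh_sach_chuoi : List String) (out : List String) : Decidable (Spec_tim_kiem_tu_giong_nhau danh_sach_chuoi out) := by unfold Spec_tim_kiem_tu_giong_nhau; infer_instance

-- ===== CLAIM (what is proved, stated in full; the proofs are below) =====
def Claim_equal_tim_kiem_tu_giong_nhau : Prop := ∀ (danh_sach_chuoi : List String), Dom_tim_kiem_tu_giong_nhau danh_sach_chuoi → Spec_tim_kiem_tu_giong_nhau danh_sach_chuoi (tim_kiem_tu_giong_nhau danh_sach_chuoi)

-- ===== LEMMAS AND PROOFS =====

-- A's inner loop appends x once iff x occurs among the later elements and is not in acc yet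
theorem pvInnerA_eq (x : String) : ∀ (ys acc : List String),
    pvInnerA x ys acc = if x ∈ ys ∧ x ∉ acc then acc ++ [x] else acc := by
  intro ys
  induction ys with
  | nil => intro acc; simp [pvInnerA]
  | cons y ys ih =>
      intro acc
      by_cases hxy : x = y
      · subst hxy
        by_cases hacc : x ∈ acc
        · simp [pvInnerA, hacc, ih]
        · simp [pvInnerA, hacc, ih]
      · simp [pvInnerA, hxy, ih]

-- the main invariant: with pre already processed, A's pair scan and B's selection pass agree
theorem pvKey (dem : PySem.Dict String Int) (l : List String)
    (hdem : ∀ y, dem.getD y 0 = (l.count y : Int)) :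
    ∀ (rest pre : List String) (da_gap : PySem.Set String) (res : List String),
      l = pre ++ rest →
      (∀ y, y ∈ da_gap ↔ y ∈ res) →
      (∀ y, y ∈ pre → 1 < l.count y → y ∈ res) →
      pvOuterA rest res = pvSelectB dem rest da_gap res := by
  intro rest
  induction rest with
  | nil => intro pre da_gap res _ _ _; rfl
  | cons x xs ih =>
      intro pre da_gap res hl hseen hpre
      have hcnt : dem.getD x 0 = (l.count x : Int) := hdem x
      have hcountx : l.count x = pre.count x + 1 + xs.count x := by
        simp [hl, List.count_append]; omega
      by_cases hres : x ∈ res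
      · -- already emitted: both sides skip x
        have hA : pvInnerA x xs res = res := by
          rw [pvInnerA_eq]; simp [hres]
        have hseenx : x ∈ da_gap := (hseen x).mpr hres
        have : pvSelectB dem (x :: xs) da_gap res = pvSelectB dem xs da_gap res := by
          simp [pvSelectB, hseenx]
        rw [pvOuterA, hA, this]
        exact ih (pre ++ [x]) da_gap res (by simp [hl]) hseen
          (by intro y hy hc; rcases List.mem_append.mp hy with h | h
              · exact hpre y h hc
              · simp at h; subst h; exact hres)
      · -- not yet emitted
        have hseenx : x ∉ da_gap := fun h => hres ((hseen x).mp h)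
        have hxpre : x ∉ pre := by
          intro hx
          exact hres (hpre x hx (by
            have : 0 < pre.count x := List.count_pos_iff.mpr hx
            omega))
        have hprecount : pre.count x = 0 := List.count_eq_zero.mpr hxpre
        -- with x ∉ pre: count l x > 1 ↔ x ∈ xs
        have hiff : (1 < l.count x) ↔ x ∈ xs := by
          rw [hcountx, hprecount]
          constructor
          · intro h; exact List.count_pos_iff.mp (by omega)
          · intro h; have := List.count_pos_iff.mpr h; omega
        by_cases hmem : x ∈ xs
        · -- both emit x
          have hc1 : 1 < l.count x := hiff.mpr hmem
          have hc1' : 1 < dem.getD x 0 := by rw [hcnt]; exact_mod_cast hc1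
          have hA : pvInnerA x xs res = res ++ [x] := by
            rw [pvInnerA_eq]; simp [hmem, hres]
          have hB : pvSelectB dem (x :: xs) da_gap res
              = pvSelectB dem xs (PySem.Set.add da_gap x) (res ++ [x]) := by
            simp [pvSelectB, hseenx, hc1']
          rw [pvOuterA, hA, hB]
          refine ih (pre ++ [x]) (PySem.Set.add da_gap x) (res ++ [x]) (by simp [hl]) ?_ ?_
          · intro y
            have h := hseen y
            simp only [pysem, List.mem_append, List.mem_singleton]
            tauto
          · intro y hy hc
            rcases List.mem_append.mp hy with h | h
            · exact List.mem_append_left _ (hpre y h hc)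
            · simp at h; simp [h]
        · -- neither emits x
          have hc1 : ¬ 1 < l.count x := fun h => hmem (hiff.mp h)
          have hc1' : ¬ 1 < dem.getD x 0 := by rw [hcnt]; exact_mod_cast hc1
          have hA : pvInnerA x xs res = res := by
            rw [pvInnerA_eq]; simp [hmem]
          have hB : pvSelectB dem (x :: xs) da_gap res = pvSelectB dem xs da_gap res := by
            simp [pvSelectB, hc1']
          rw [pvOuterA, hA, hB]
          refine ih (pre ++ [x]) da_gap res (by simp [hl]) hseen ?_
          intro y hy hc
          rcases List.mem_append.mp hy with h | h
          · exact hpre y h hc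
          · simp at h; subst h; exact absurd hc hc1
  
-- ===== VERDICT (by name: the statement is the Claim_ definition above) =====
theorem tim_kiem_tu_giong_nhau_spec : Claim_equal_tim_kiem_tu_giong_nhau := by
  intro l _
  unfold Spec_tim_kiem_tu_giong_nhau tim_kiem_tu_giong_nhau tim_kiem_tu_giong_nhau_alt
  refine pvKey _ l ?_ l [] PySem.Set.empty [] rfl (by simp [PySem.Set.empty]) (by simp)
  intro y
  simp [PySem.Dict.getD_foldl_insert_add_one]
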